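-- pv_equiv track=rewrite | github.com/roku0811/ConnectFourGame | BoardGame.py | all_diagonals
-- ===== SOURCE A (Python) =====
-- def all_diagonals(tdlist):
--     diags = []
--     buffer = 'B'
--     buff_list_right = []
--     buff_list_left = []
--     for r in range(len(tdlist)):
--         buff_list_right += [r*[buffer] + tdlist[r][:] + (len(tdlist)-1-r)*[buffer]]
--         buff_list_left += [(len(tdlist)-1-r)*[buffer] + tdlist[r][:] + r*[buffer]]
--
--     for i in range(len(buff_list_right[0])):
--         diags += [[buff_list_right[x][i] for x in range(len(buff_list_right)) if buff_list_right[x][i] != 'B']]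
--         diags += [[buff_list_left[x][i] for x in range(len(buff_list_left)) if buff_list_left[x][i] != 'B']]
--
--
--     return diags
-- ===== SOURCE B (Python) =====
-- def all_diagonals(tdlist):
--     R = len(tdlist)
--     n = R - 1 + len(tdlist[0])
--     diags = []
--     for i in range(n):
--         diags.append([tdlist[r][i - r]
--                       for r in range(min(R, i + 1))
--                       if i - r < len(tdlist[r]) and tdlist[r][i - r] != 'B'])
--         diags.append([tdlist[r][i - R + 1 + r]
--                       for r in range(max(0, R - 1 - i), R)
--                       if i - R + 1 + r < len(tdlist[r]) and tdlist[r][i - R + 1 + r] != 'B'])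
--     return diags
-- ===== Notes on version B (the rewrite author's own statement) =====
-- stated objective: simpler
-- what changed: B drops A's padded 'B' buffer matrices entirely and reads each diagonal directly by index arithmetic (anti-diagonal r+c=i, main diagonal c-r=i-R+1) with per-row length guards, keeping the same != 'B' cell filter.
import Mathlib
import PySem

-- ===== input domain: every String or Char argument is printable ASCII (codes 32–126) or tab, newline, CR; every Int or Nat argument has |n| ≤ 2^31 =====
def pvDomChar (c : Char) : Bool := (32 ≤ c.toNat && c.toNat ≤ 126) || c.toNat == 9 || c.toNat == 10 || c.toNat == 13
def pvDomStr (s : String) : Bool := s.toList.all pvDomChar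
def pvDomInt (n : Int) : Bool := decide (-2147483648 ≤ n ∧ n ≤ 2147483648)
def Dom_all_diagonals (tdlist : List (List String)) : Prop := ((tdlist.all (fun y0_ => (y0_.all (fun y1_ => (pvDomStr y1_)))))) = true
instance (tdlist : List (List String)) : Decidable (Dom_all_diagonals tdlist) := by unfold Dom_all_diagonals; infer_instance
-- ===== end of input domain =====

-- B drops A's padded 'B' buffer matrices and reads each diagonal directly by index
-- arithmetic with per-row length guards (objective: simpler); same return values on Pre_.

-- ===== PORT A =====
-- literal port of A: build the two padded buffer matrices, then scan their columns.
-- Python indexing buff[x][i] / tdlist[r] is in range on every input admitted by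
-- Pre_all_diagonals, so getD defaults are never taken there.
def all_diagonals (tdlist : List (List String)) : List (List String) :=
  let buffer := "B"
  let buffListRight := (List.range tdlist.length).foldl (fun acc r =>
      acc ++ [List.replicate r buffer ++ tdlist.getD r [] ++ List.replicate (tdlist.length - 1 - r) buffer]) []
  let buffListLeft := (List.range tdlist.length).foldl (fun acc r =>
      acc ++ [List.replicate (tdlist.length - 1 - r) buffer ++ tdlist.getD r [] ++ List.replicate r buffer]) []
  (List.range (buffListRight.getD 0 []).length).foldl (fun diags i =>
      diags ++ [((List.range buffListRight.length).map (fun x => (buffListRight.getD x []).getD i "")).filter (fun s => !(s == "B"))]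
            ++ [((List.range buffListLeft.length).map (fun x => (buffListLeft.getD x []).getD i "")).filter (fun s => !(s == "B"))]) []

-- ===== PORT B =====
-- literal port of Source B: for each i, the anti-diagonal r+c=i then the main diagonal c-r=i-R+1,
-- each as a guarded comprehension (filterMap) over the row range.
def all_diagonals_alt (tdlist : List (List String)) : List (List String) :=
  let R := tdlist.length
  let n := R - 1 + (tdlist.getD 0 []).length
  (List.range n).foldl (fun diags i =>
      diags ++ [(List.range (min R (i + 1))).filterMap (fun r =>
                  if i - r < (tdlist.getD r []).length ∧ (tdlist.getD r []).getD (i - r) "" ≠ "B"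
                  then some ((tdlist.getD r []).getD (i - r) "") else none)]
            ++ [(List.range' (R - 1 - i) (R - (R - 1 - i))).filterMap (fun r =>
                  if i + 1 + r - R < (tdlist.getD r []).length ∧ (tdlist.getD r []).getD (i + 1 + r - R) "" ≠ "B"
                  then some ((tdlist.getD r []).getD (i + 1 + r - R) "") else none)]) []

-- ===== PRECONDITION & SPEC =====
-- Pre_: tdlist is nonempty and no row is shorter than the first row — exactly the
-- inputs on which Python A returns (otherwise its padded-buffer indexing raises IndexError).
def Pre_all_diagonals (tdlist : List (List String)) : Prop :=
  tdlist ≠ [] ∧ ∀ row ∈ tdlist, (tdlist.getD 0 []).length ≤ row.length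
instance (tdlist : List (List String)) : Decidable (Pre_all_diagonals tdlist) := by
  unfold Pre_all_diagonals; infer_instance
def pvWitness_all_diagonals : List (List String) := [["a", "B"], ["c", "d"]]

def Spec_all_diagonals (tdlist : List (List String)) (out : List (List String)) : Prop := out = all_diagonals_alt tdlist
instance (tdlist : List (List String)) (out : List (List String)) : Decidable (Spec_all_diagonals tdlist out) := by unfold Spec_all_diagonals; infer_instance

-- ===== CLAIM (what is proved, stated in full; the proofs are below) =====
def Claim_equal_all_diagonals : Prop := ∀ (tdlist : List (List String)), Dom_all_diagonals tdlist → Pre_all_diagonals tdlist → Spec_all_diagonals tdlist (all_diagonals tdlist)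
-- ===== LEMMAS AND PROOFS =====

lemma pad_getD (a b : Nat) (row : List String) (i : Nat) (h : i < a + row.length + b) :
    (List.replicate a "B" ++ row ++ List.replicate b "B").getD i "" =
    if a ≤ i ∧ i - a < row.length then row.getD (i - a) "" else "B" := by
  rw [List.getD_eq_getElem?_getD]
  by_cases h1 : i < a
  · rw [if_neg (by omega), List.getElem?_append_left (by simp; omega),
        List.getElem?_append_left (by simpa using h1)]
    simp [h1]
  · by_cases h2 : i - a < row.length
    · rw [if_pos ⟨by omega, h2⟩, List.getElem?_append_left (by simp; omega),
          List.getElem?_append_right (by simp; omega)]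
      simp [List.getD_eq_getElem?_getD]
    · rw [if_neg (by omega), List.getElem?_append_right (by simp; omega)]
      simp only [List.length_append, List.length_replicate]
      rw [List.getElem?_replicate_of_lt (by omega)]
      rfl

lemma guard_filterMap (l : List Nat) (p : Nat → Prop) [DecidablePred p] (f : Nat → String) :
    l.filterMap (fun r => if p r then some (f r) else none)
      = (l.filter (fun r => decide (p r))).map f := by
  induction l with
  | nil => rfl
  | cons x t ih => by_cases hx : p x <;> simp [hx, ih]

lemma row_len {tdlist : List (List String)} (hC : ∀ row ∈ tdlist, (tdlist.getD 0 []).length ≤ row.length)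
    {x : Nat} (hx : x < tdlist.length) : (tdlist.getD 0 []).length ≤ (tdlist.getD x []).length := by
  rw [List.getD_eq_getElem _ _ hx]
  exact hC _ (List.getElem_mem hx)

lemma range_split (k n : Nat) (hk : k ≤ n) :
    List.range n = List.range k ++ List.range' k (n - k) := by
  have h1 : n = k + (n - k) := by omega
  rw [List.range'_eq_map_range, ← List.range_add, ← h1]

lemma right_diag (tdlist : List (List String)) (i : Nat)
    (hC : ∀ row ∈ tdlist, (tdlist.getD 0 []).length ≤ row.length)
    (hi : i < tdlist.length - 1 + (tdlist.getD 0 []).length) :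
    ((List.range tdlist.length).map (fun x =>
        (List.replicate x "B" ++ tdlist.getD x [] ++ List.replicate (tdlist.length - 1 - x) "B").getD i "")).filter (fun s => !(s == "B"))
    = (List.range (min tdlist.length (i + 1))).filterMap (fun r =>
        if i - r < (tdlist.getD r []).length ∧ (tdlist.getD r []).getD (i - r) "" ≠ "B"
        then some ((tdlist.getD r []).getD (i - r) "") else none) := by
  have hmap : ∀ x ∈ List.range tdlist.length,
      (List.replicate x "B" ++ tdlist.getD x [] ++ List.replicate (tdlist.length - 1 - x) "B").getD i ""
      = if x ≤ i ∧ i - x < (tdlist.getD x []).length then (tdlist.getD x []).getD (i - x) "" else "B" := by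
    intro x hx
    have hxR := List.mem_range.mp hx
    have hlen := row_len hC hxR
    exact pad_getD _ _ _ _ (by omega)
  rw [List.map_congr_left hmap, List.filter_map, guard_filterMap,
      range_split (min tdlist.length (i + 1)) tdlist.length (Nat.min_le_left _ _),
      List.filter_append]
  have h2 : (List.range' (min tdlist.length (i + 1)) (tdlist.length - min tdlist.length (i + 1))).filter
      ((fun s => !(s == "B")) ∘ fun x => if x ≤ i ∧ i - x < (tdlist.getD x []).length then (tdlist.getD x []).getD (i - x) "" else "B") = [] := by
    rw [List.filter_eq_nil_iff]
    intro x hx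
    have := List.mem_range'_1.mp hx
    have hxi : ¬ (x ≤ i ∧ i - x < (tdlist.getD x []).length) := by omega
    show ¬ _
    rw [Function.comp_apply, if_neg hxi]
    simp
  rw [h2, List.append_nil]
  have h3 : (List.range (min tdlist.length (i + 1))).filter
      ((fun s => !(s == "B")) ∘ fun x => if x ≤ i ∧ i - x < (tdlist.getD x []).length then (tdlist.getD x []).getD (i - x) "" else "B")
      = (List.range (min tdlist.length (i + 1))).filter
      (fun r => decide (i - r < (tdlist.getD r []).length ∧ (tdlist.getD r []).getD (i - r) "" ≠ "B")) := by
    apply List.filter_congr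
    intro x hx
    have hxk := List.mem_range.mp hx
    have hxi : x ≤ i := by omega
    rw [Function.comp_apply]
    by_cases hw : i - x < (tdlist.getD x []).length
    · rw [if_pos ⟨hxi, hw⟩]
      simp only [List.getD_eq_getElem?_getD] at hw
      simp only [List.getD_eq_getElem?_getD]
      rw [Bool.eq_iff_iff]
      simp [hw]
    · rw [if_neg (by tauto)]
      simp only [List.getD_eq_getElem?_getD] at hw
      simp [hw]
  rw [h3]
  apply List.map_congr_left
  intro x hx
  obtain ⟨hxm, hp⟩ := List.mem_filter.mp hx
  have hcond := of_decide_eq_true hp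
  have hxi : x ≤ i := by have := List.mem_range.mp hxm; omega
  rw [if_pos ⟨hxi, hcond.1⟩]


-- column i of A's left-padded buffer matrix equals B's main-diagonal comprehension
lemma left_diag (tdlist : List (List String)) (i : Nat)
    (hC : ∀ row ∈ tdlist, (tdlist.getD 0 []).length ≤ row.length)
    (hi : i < tdlist.length - 1 + (tdlist.getD 0 []).length) :
    ((List.range tdlist.length).map (fun x =>
        (List.replicate (tdlist.length - 1 - x) "B" ++ tdlist.getD x [] ++ List.replicate x "B").getD i "")).filter (fun s => !(s == "B"))
    = (List.range' (tdlist.length - 1 - i) (tdlist.length - (tdlist.length - 1 - i))).filterMap (fun r =>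
        if i + 1 + r - tdlist.length < (tdlist.getD r []).length ∧ (tdlist.getD r []).getD (i + 1 + r - tdlist.length) "" ≠ "B"
        then some ((tdlist.getD r []).getD (i + 1 + r - tdlist.length) "") else none) := by
  have hmap : ∀ x ∈ List.range tdlist.length,
      (List.replicate (tdlist.length - 1 - x) "B" ++ tdlist.getD x [] ++ List.replicate x "B").getD i ""
      = if tdlist.length - 1 - x ≤ i ∧ i - (tdlist.length - 1 - x) < (tdlist.getD x []).length
        then (tdlist.getD x []).getD (i - (tdlist.length - 1 - x)) "" else "B" := by
    intro x hx
    have hxR := List.mem_range.mp hx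
    have hlen := row_len hC hxR
    exact pad_getD _ _ _ _ (by omega)
  rw [List.map_congr_left hmap, List.filter_map, guard_filterMap,
      range_split (tdlist.length - 1 - i) tdlist.length (by omega),
      List.filter_append]
  have h2 : (List.range (tdlist.length - 1 - i)).filter
      ((fun s => !(s == "B")) ∘ fun x => if tdlist.length - 1 - x ≤ i ∧ i - (tdlist.length - 1 - x) < (tdlist.getD x []).length
        then (tdlist.getD x []).getD (i - (tdlist.length - 1 - x)) "" else "B") = [] := by
    rw [List.filter_eq_nil_iff]
    intro x hx
    have := List.mem_range.mp hx
    have hxi : ¬ (tdlist.length - 1 - x ≤ i ∧ i - (tdlist.length - 1 - x) < (tdlist.getD x []).length) := by omega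
    show ¬ _
    rw [Function.comp_apply, if_neg hxi]
    simp
  rw [h2, List.nil_append]
  have h3 : (List.range' (tdlist.length - 1 - i) (tdlist.length - (tdlist.length - 1 - i))).filter
      ((fun s => !(s == "B")) ∘ fun x => if tdlist.length - 1 - x ≤ i ∧ i - (tdlist.length - 1 - x) < (tdlist.getD x []).length
        then (tdlist.getD x []).getD (i - (tdlist.length - 1 - x)) "" else "B")
      = (List.range' (tdlist.length - 1 - i) (tdlist.length - (tdlist.length - 1 - i))).filter
      (fun r => decide (i + 1 + r - tdlist.length < (tdlist.getD r []).length ∧ (tdlist.getD r []).getD (i + 1 + r - tdlist.length) "" ≠ "B")) := by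
    apply List.filter_congr
    intro x hx
    have hxm := List.mem_range'_1.mp hx
    have e : i - (tdlist.length - 1 - x) = i + 1 + x - tdlist.length := by omega
    have c1 : tdlist.length - 1 - x ≤ i := by omega
    rw [Function.comp_apply]
    by_cases hw : i + 1 + x - tdlist.length < (tdlist.getD x []).length
    · rw [if_pos ⟨c1, by rw [e]; exact hw⟩, e]
      simp only [List.getD_eq_getElem?_getD] at hw ⊢
      rw [Bool.eq_iff_iff]
      simp [hw]
    · rw [if_neg (fun hcc => hw (by rw [← e]; exact hcc.2))]
      simp only [List.getD_eq_getElem?_getD] at hw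
      simp [hw]
  rw [h3]
  apply List.map_congr_left
  intro x hx
  obtain ⟨hxm, hp⟩ := List.mem_filter.mp hx
  have hcond := of_decide_eq_true hp
  have hxb := List.mem_range'_1.mp hxm
  have e : i - (tdlist.length - 1 - x) = i + 1 + x - tdlist.length := by omega
  rw [if_pos ⟨by omega, by rw [e]; exact hcond.1⟩, e]

lemma flatMap_congr_mem (l : List Nat) (f g : Nat → List (List String))
    (h : ∀ x ∈ l, f x = g x) : l.flatMap f = l.flatMap g := by
  induction l with
  | nil => rfl
  | cons x t ih =>
      simp only [List.flatMap_cons]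
      rw [h x (by simp), ih (fun y hy => h y (by simp [hy]))]

lemma reshape_aux (f g : Nat → List String) :
    ∀ (l : List Nat) (acc : List (List String)),
      l.foldl (fun d i => d ++ [f i] ++ [g i]) acc = acc ++ l.flatMap (fun i => [f i, g i]) := by
  intro l
  induction l with
  | nil => simp
  | cons x t ih =>
      intro acc
      simp only [List.foldl_cons, List.flatMap_cons, ih]
      simp [List.append_assoc]

lemma reshape (n : Nat) (f g : Nat → List String) :
    (List.range n).foldl (fun d i => d ++ [f i] ++ [g i]) []
      = (List.range n).flatMap (fun i => [f i, g i]) := by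
  simpa using reshape_aux f g (List.range n) []

-- ===== VERDICT (by name: the statement is the Claim_ definition above) =====
theorem all_diagonals_spec : Claim_equal_all_diagonals := by
  intro tdlist _ hpre
  obtain ⟨hne, hC⟩ := hpre
  have hR : 0 < tdlist.length := List.length_pos_iff.mpr hne
  unfold Spec_all_diagonals all_diagonals all_diagonals_alt
  simp only [PySem.List.foldl_append_singleton_eq_map, List.nil_append,
             List.length_map, List.length_range]
  have hbuf : ∀ (f : Nat → List String) (x : Nat), x < tdlist.length →
      ((List.range tdlist.length).map f).getD x [] = f x := by
    intro f x hx
    rw [List.getD_eq_getElem _ _ (by simpa using hx)]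
    simp
  have hn : (((List.range tdlist.length).map (fun r =>
      List.replicate r "B" ++ tdlist.getD r [] ++ List.replicate (tdlist.length - 1 - r) "B")).getD 0 []).length
      = tdlist.length - 1 + (tdlist.getD 0 []).length := by
    rw [hbuf _ 0 hR]
    simp [List.length_append]
    omega
  rw [hn, reshape, reshape]
  apply flatMap_congr_mem
  intro i hi
  have hiL := List.mem_range.mp hi
  have e1 : (List.range tdlist.length).map (fun x =>
      (((List.range tdlist.length).map (fun r => List.replicate r "B" ++ tdlist.getD r [] ++ List.replicate (tdlist.length - 1 - r) "B")).getD x []).getD i "")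
      = (List.range tdlist.length).map (fun x =>
      (List.replicate x "B" ++ tdlist.getD x [] ++ List.replicate (tdlist.length - 1 - x) "B").getD i "") :=
    List.map_congr_left (fun x hx => by rw [hbuf _ _ (List.mem_range.mp hx)])
  have e2 : (List.range tdlist.length).map (fun x =>
      (((List.range tdlist.length).map (fun r => List.replicate (tdlist.length - 1 - r) "B" ++ tdlist.getD r [] ++ List.replicate r "B")).getD x []).getD i "")
      = (List.range tdlist.length).map (fun x =>
      (List.replicate (tdlist.length - 1 - x) "B" ++ tdlist.getD x [] ++ List.replicate x "B").getD i "") :=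
    List.map_congr_left (fun x hx => by rw [hbuf _ _ (List.mem_range.mp hx)])
  rw [e1, e2, right_diag tdlist i hC hiL, left_diag tdlist i hC hiL]
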